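-- pv_equiv track=rewrite | github.com/981377660LMT/algorithm-study | 15_双指针/经典题/两个pair之和的最小差值.py | solve
-- ===== SOURCE A (Python) =====
-- def solve(nums):
--     n = len(nums)
--     nums.sort()
--
--     res = int(1e20)
--     # 两个指针固定首尾，中间两个移动
--     for i in range(n - 3):
--         for j in range(i + 3, n):
--             target = nums[i] + nums[j]
--             start = i + 1
--             end = j - 1
--             while start < end:
--                 curSum = nums[start] + nums[end]
--                 res = min(res, abs(curSum - target))
--                 if curSum < target:
--                     start += 1
--                 else:
--                     end -= 1
--     return res
-- ===== SOURCE B (Python) =====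
-- def solve(nums):
--     n = len(nums)
--     nums.sort()
--     res = int(1e20)
--     for i in range(n - 3):
--         for j in range(i + 3, n):
--             target = nums[i] + nums[j]
--             for start in range(i + 1, j):
--                 for end in range(start + 1, j):
--                     res = min(res, abs(nums[start] + nums[end] - target))
--     return res
-- ===== Notes on version B (the rewrite author's own statement) =====
-- stated objective: alternative
-- what changed: The converging two-pointer inner while-loop is replaced by an exhaustive double loop over all middle pairs (start,end) with i<start<end<j, proving the two-pointer scan's minimum equals the minimum over the full pair set on the sorted list.
import Mathlib
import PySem

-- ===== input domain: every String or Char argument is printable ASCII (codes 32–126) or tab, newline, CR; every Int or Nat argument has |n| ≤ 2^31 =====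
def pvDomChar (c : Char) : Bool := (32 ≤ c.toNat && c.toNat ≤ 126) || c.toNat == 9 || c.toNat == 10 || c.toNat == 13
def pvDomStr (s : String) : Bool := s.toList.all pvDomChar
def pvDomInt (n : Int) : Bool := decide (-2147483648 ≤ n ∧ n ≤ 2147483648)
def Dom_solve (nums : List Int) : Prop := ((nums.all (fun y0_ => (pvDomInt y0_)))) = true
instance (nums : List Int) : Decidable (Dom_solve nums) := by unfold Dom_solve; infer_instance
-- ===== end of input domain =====

-- B replaces A's converging two-pointer inner while-loop by an exhaustive double loop over all
-- middle pairs (same minimum on the sorted list). Equivalence is about the RETURN value only;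
-- both Python versions sort `nums` in place (same side effect).

-- ===== PORT A =====
-- the inner `while start < end` loop of A (curSum inlined; indices are always in range, default 0)
def solveTwoPtr (a : List Int) (t s e res : Int) : Int :=
  if _h : s < e then
    if PySem.List.pyGetD a s 0 + PySem.List.pyGetD a e 0 < t then
      solveTwoPtr a t (s + 1) e (min res |PySem.List.pyGetD a s 0 + PySem.List.pyGetD a e 0 - t|)
    else
      solveTwoPtr a t s (e - 1) (min res |PySem.List.pyGetD a s 0 + PySem.List.pyGetD a e 0 - t|)
  else res
termination_by (e - s).toNat
decreasing_by all_goals omega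

def solve (nums : List Int) : Int :=
  let a := PySem.List.sorted nums (fun x => x) false
  let n : Int := a.length
  (PySem.List.pyRange 0 (n - 3) 1).foldl (fun res i =>
    (PySem.List.pyRange (i + 3) n 1).foldl (fun res j =>
      solveTwoPtr a (PySem.List.pyGetD a i 0 + PySem.List.pyGetD a j 0) (i + 1) (j - 1) res)
      res) (10 ^ 20)

-- ===== PORT B =====
def solve_alt (nums : List Int) : Int :=
  let a := PySem.List.sorted nums (fun x => x) false
  let n : Int := a.length
  (PySem.List.pyRange 0 (n - 3) 1).foldl (fun res i =>
    (PySem.List.pyRange (i + 3) n 1).foldl (fun res j =>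
      (PySem.List.pyRange (i + 1) j 1).foldl (fun res start =>
        (PySem.List.pyRange (start + 1) j 1).foldl (fun res e =>
          min res |PySem.List.pyGetD a start 0 + PySem.List.pyGetD a e 0 -
            (PySem.List.pyGetD a i 0 + PySem.List.pyGetD a j 0)|)
          res) res) res) (10 ^ 20)

-- ===== PRECONDITION & SPEC =====
def Spec_solve (nums : List Int) (out : Int) : Prop := out = solve_alt nums
instance (nums : List Int) (out : Int) : Decidable (Spec_solve nums out) := by unfold Spec_solve; infer_instance

-- ===== CLAIM (what is proved, stated in full; the proofs are below) =====
def Claim_equal_solve : Prop := ∀ (nums : List Int), Dom_solve nums → Spec_solve nums (solve nums)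

-- ===== LEMMAS AND PROOFS =====

-- generic facts about a running minimum of a projection
theorem foldmin_le_init {α : Type} (h : α → Int) (L : List α) (res : Int) :
    L.foldl (fun r x => min r (h x)) res ≤ res := by
  induction L generalizing res with
  | nil => simp
  | cons x t ih => exact le_trans (ih _) (min_le_left _ _)

theorem foldmin_le_mem {α : Type} (h : α → Int) {L : List α} {x : α} (hx : x ∈ L) (res : Int) :
    L.foldl (fun r y => min r (h y)) res ≤ h x := by
  induction L generalizing res with
  | nil => cases hx
  | cons y t ih =>
    rcases List.mem_cons.mp hx with rfl | hx'
    · exact le_trans (foldmin_le_init h t _) (min_le_right _ _)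
    · exact ih hx' _

theorem foldmin_cases {α : Type} (h : α → Int) (L : List α) (res : Int) :
    L.foldl (fun r x => min r (h x)) res = res ∨
      ∃ x ∈ L, L.foldl (fun r y => min r (h y)) res = h x := by
  induction L generalizing res with
  | nil => left; rfl
  | cons y t ih =>
    rcases ih (min res (h y)) with h1 | ⟨x, hx, h1⟩
    · rcases le_total res (h y) with hm | hm
      · left; simpa [min_eq_left hm] using h1
      · right; exact ⟨y, List.mem_cons_self .., by simpa [min_eq_right hm] using h1⟩
    · right; exact ⟨x, List.mem_cons_of_mem _ hx, h1⟩

-- the same three facts for B's nested double minimum loop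
theorem dmin_le_init (f : Int → Int → Int) (K : Int → List Int) (L : List Int) (res : Int) :
    L.foldl (fun r s => (K s).foldl (fun r e => min r (f s e)) r) res ≤ res := by
  induction L generalizing res with
  | nil => simp
  | cons s t ih => exact le_trans (ih _) (foldmin_le_init (f s) (K s) res)

theorem dmin_le_mem (f : Int → Int → Int) (K : Int → List Int) {L : List Int} {s e : Int}
    (hs : s ∈ L) (he : e ∈ K s) (res : Int) :
    L.foldl (fun r s => (K s).foldl (fun r e => min r (f s e)) r) res ≤ f s e := by
  induction L generalizing res with
  | nil => cases hs
  | cons y t ih =>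
    rcases List.mem_cons.mp hs with rfl | hs'
    · exact le_trans (dmin_le_init f K t _) (foldmin_le_mem (f s) he res)
    · exact ih hs' _

theorem dmin_cases (f : Int → Int → Int) (K : Int → List Int) (L : List Int) (res : Int) :
    L.foldl (fun r s => (K s).foldl (fun r e => min r (f s e)) r) res = res ∨
      ∃ s ∈ L, ∃ e ∈ K s,
        L.foldl (fun r s => (K s).foldl (fun r e => min r (f s e)) r) res = f s e := by
  induction L generalizing res with
  | nil => left; rfl
  | cons y t ih =>
    rcases ih ((K y).foldl (fun r e => min r (f y e)) res) with h1 | ⟨s, hs, e, he, h1⟩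
    · rcases foldmin_cases (f y) (K y) res with h2 | ⟨e, he, h2⟩
      · left; rw [List.foldl_cons, h1, h2]
      · right; exact ⟨y, List.mem_cons_self .., e, he, by rw [List.foldl_cons, h1, h2]⟩
    · right; exact ⟨s, List.mem_cons_of_mem _ hs, e, he, h1⟩

-- A's two-pointer loop never exceeds its running result
theorem twoPtr_le_init (a : List Int) (t s e res : Int) : solveTwoPtr a t s e res ≤ res := by
  rw [solveTwoPtr]
  split
  · split
    · exact le_trans (twoPtr_le_init a t (s + 1) e _) (min_le_left _ _)
    · exact le_trans (twoPtr_le_init a t s (e - 1) _) (min_le_left _ _)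
  · exact le_refl res
termination_by (e - s).toNat
decreasing_by all_goals omega

-- on a sorted list, the two-pointer result is a lower bound for EVERY pair in the window,
-- including the pairs the converging scan skips (domination argument)
theorem twoPtr_le_pair (a : List Int)
    (hmono : ∀ x y : Int, 0 ≤ x → x ≤ y → y < (a.length : Int) →
      PySem.List.pyGetD a x 0 ≤ PySem.List.pyGetD a y 0)
    (t s e res x y : Int) (hs : 0 ≤ s) (he : e < (a.length : Int))
    (h1 : s ≤ x) (h2 : x < y) (h3 : y ≤ e) :
    solveTwoPtr a t s e res ≤ |PySem.List.pyGetD a x 0 + PySem.List.pyGetD a y 0 - t| := by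
  have hse : s < e := by omega
  rw [solveTwoPtr, dif_pos hse]
  by_cases hct : PySem.List.pyGetD a s 0 + PySem.List.pyGetD a e 0 < t
  · rw [if_pos hct]
    by_cases hx : s + 1 ≤ x
    · exact twoPtr_le_pair a hmono t (s + 1) e _ x y (by omega) he hx h2 h3
    · have hxs : x = s := by omega
      subst hxs
      by_cases hy : y = e
      · subst hy
        exact le_trans (twoPtr_le_init a t (x + 1) y _) (min_le_right _ _)
      · have hgy : PySem.List.pyGetD a y 0 ≤ PySem.List.pyGetD a e 0 :=
          hmono y e (by omega) (by omega) he
        calc solveTwoPtr a t (x + 1) e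
              (min res |PySem.List.pyGetD a x 0 + PySem.List.pyGetD a e 0 - t|)
            ≤ min res |PySem.List.pyGetD a x 0 + PySem.List.pyGetD a e 0 - t| :=
              twoPtr_le_init a t (x + 1) e _
          _ ≤ |PySem.List.pyGetD a x 0 + PySem.List.pyGetD a e 0 - t| := min_le_right _ _
          _ ≤ |PySem.List.pyGetD a x 0 + PySem.List.pyGetD a y 0 - t| := by
              rw [abs_of_neg (by omega), abs_of_neg (by omega)]; omega
  · rw [if_neg hct]
    by_cases hy : y ≤ e - 1
    · exact twoPtr_le_pair a hmono t s (e - 1) _ x y hs (by omega) h1 h2 hy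
    · have hye : y = e := by omega
      subst hye
      by_cases hx : x = s
      · subst hx
        exact le_trans (twoPtr_le_init a t x (y - 1) _) (min_le_right _ _)
      · have hgx : PySem.List.pyGetD a s 0 ≤ PySem.List.pyGetD a x 0 :=
          hmono s x hs (by omega) (by omega)
        calc solveTwoPtr a t s (y - 1)
              (min res |PySem.List.pyGetD a s 0 + PySem.List.pyGetD a y 0 - t|)
            ≤ min res |PySem.List.pyGetD a s 0 + PySem.List.pyGetD a y 0 - t| :=
              twoPtr_le_init a t s (y - 1) _
          _ ≤ |PySem.List.pyGetD a s 0 + PySem.List.pyGetD a y 0 - t| := min_le_right _ _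
          _ ≤ |PySem.List.pyGetD a x 0 + PySem.List.pyGetD a y 0 - t| := by
              rw [abs_of_nonneg (by omega), abs_of_nonneg (by omega)]; omega
termination_by (e - s).toNat
decreasing_by all_goals omega

-- the two-pointer result is either the initial value or the value of some visited pair
theorem twoPtr_cases (a : List Int) (t s e res : Int) :
    solveTwoPtr a t s e res = res ∨
      ∃ x y, s ≤ x ∧ x < y ∧ y ≤ e ∧
        solveTwoPtr a t s e res = |PySem.List.pyGetD a x 0 + PySem.List.pyGetD a y 0 - t| := by
  rw [solveTwoPtr]
  split
  · rename_i hse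
    split
    · rcases twoPtr_cases a t (s + 1) e
        (min res |PySem.List.pyGetD a s 0 + PySem.List.pyGetD a e 0 - t|) with h | ⟨x, y, hx, hy, hye, h⟩
      · rcases le_total res |PySem.List.pyGetD a s 0 + PySem.List.pyGetD a e 0 - t| with hm | hm
        · left; rw [h, min_eq_left hm]
        · right; exact ⟨s, e, le_refl s, hse, le_refl e, by rw [h, min_eq_right hm]⟩
      · right; exact ⟨x, y, by omega, hy, hye, h⟩
    · rcases twoPtr_cases a t s (e - 1)
        (min res |PySem.List.pyGetD a s 0 + PySem.List.pyGetD a e 0 - t|) with h | ⟨x, y, hx, hy, hye, h⟩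
      · rcases le_total res |PySem.List.pyGetD a s 0 + PySem.List.pyGetD a e 0 - t| with hm | hm
        · left; rw [h, min_eq_left hm]
        · right; exact ⟨s, e, le_refl s, hse, le_refl e, by rw [h, min_eq_right hm]⟩
      · right; exact ⟨x, y, hx, hy, by omega, h⟩
  · left; rfl
termination_by (e - s).toNat
decreasing_by all_goals omega

-- per (i, j): the two-pointer minimum equals B's exhaustive double-loop minimum
theorem inner_eq (a : List Int)
    (hmono : ∀ x y : Int, 0 ≤ x → x ≤ y → y < (a.length : Int) →
      PySem.List.pyGetD a x 0 ≤ PySem.List.pyGetD a y 0)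
    (t i j res : Int) (hi : 0 ≤ i) (_hij : i + 3 ≤ j) (hj : j < (a.length : Int)) :
    solveTwoPtr a t (i + 1) (j - 1) res =
      (PySem.List.pyRange (i + 1) j 1).foldl (fun r s =>
        (PySem.List.pyRange (s + 1) j 1).foldl (fun r e =>
          min r |PySem.List.pyGetD a s 0 + PySem.List.pyGetD a e 0 - t|) r) res := by
  apply le_antisymm
  · rcases dmin_cases (fun s e => |PySem.List.pyGetD a s 0 + PySem.List.pyGetD a e 0 - t|)
      (fun s => PySem.List.pyRange (s + 1) j 1) (PySem.List.pyRange (i + 1) j 1) res with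
      h | ⟨s, hs, e, he, h⟩
    · rw [h]; exact twoPtr_le_init a t (i + 1) (j - 1) res
    · rw [h]
      obtain ⟨hs1, hs2⟩ := PySem.List.mem_pyRange_one.mp hs
      obtain ⟨he1, he2⟩ := PySem.List.mem_pyRange_one.mp he
      exact twoPtr_le_pair a hmono t (i + 1) (j - 1) res s e (by omega) (by omega)
        hs1 (by omega) (by omega)
  · rcases twoPtr_cases a t (i + 1) (j - 1) res with h | ⟨x, y, hx, hy, hye, h⟩
    · rw [h]
      exact dmin_le_init (fun s e => |PySem.List.pyGetD a s 0 + PySem.List.pyGetD a e 0 - t|)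
        (fun s => PySem.List.pyRange (s + 1) j 1) _ res
    · rw [h]
      exact dmin_le_mem (fun s e => |PySem.List.pyGetD a s 0 + PySem.List.pyGetD a e 0 - t|)
        (fun s => PySem.List.pyRange (s + 1) j 1)
        (PySem.List.mem_pyRange_one.mpr ⟨hx, by omega⟩)
        (PySem.List.mem_pyRange_one.mpr ⟨by omega, by omega⟩) res

-- the sorted list is index-monotone
theorem sorted_pyGetD_mono (nums : List Int) :
    ∀ x y : Int, 0 ≤ x → x ≤ y →
      y < ((PySem.List.sorted nums (fun v => v) false).length : Int) →
      PySem.List.pyGetD (PySem.List.sorted nums (fun v => v) false) x 0 ≤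
        PySem.List.pyGetD (PySem.List.sorted nums (fun v => v) false) y 0 := by
  intro x y hx hxy hy
  rw [PySem.List.pyGetD_eq_getElem _ _ hx (by omega),
    PySem.List.pyGetD_eq_getElem _ _ (by omega) hy]
  exact PySem.List.sorted_id_getElem_mono nums (by omega) (by omega)

theorem solve_eq_alt (nums : List Int) : solve nums = solve_alt nums := by
  unfold solve solve_alt
  apply PySem.List.foldl_congr_mem
  intro res i hi
  obtain ⟨hi1, hi2⟩ := PySem.List.mem_pyRange_one.mp hi
  apply PySem.List.foldl_congr_mem
  intro res j hj
  obtain ⟨hj1, hj2⟩ := PySem.List.mem_pyRange_one.mp hj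
  exact inner_eq _ (sorted_pyGetD_mono nums) _ i j res hi1 hj1 hj2

-- ===== VERDICT (by name: the statement is the Claim_ definition above) =====
theorem solve_spec : Claim_equal_solve := by
  intro nums _
  exact solve_eq_alt nums
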